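-- pv_equiv track=rewrite | github.com/lucasgarayy/Wincent-Dragonbyte | Number Pairs/N3/digit_dp.py | find_pair_digit_dp
-- ===== SOURCE A (Python) =====
-- from functools import lru_cache
--
-- def find_pair_digit_dp(d):
--     if d == 0:
--         return 0, 0
--
--     if d % 9 != 0:
--         return None
--     digits = list(map(int, str(d)[::-1])) + [0]
--     L = len(digits)
--     max_delta = 9 * L
--
--
--     @lru_cache(None)
--     def dfs(pos, carry, delta):
--
--         if pos == L:
--            return [] if (carry == 0 and delta == 0) else None
--
--         d_i = digits[pos] if pos < L else 0
--
--         for a_i in range(10):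
--             s = a_i + d_i + carry
--             b_i = s % 10
--             new_carry = s // 10
--
--             new_delta = delta + (a_i - b_i)
--             if abs(new_delta) > max_delta:
--                 continue
--
--             res = dfs(pos + 1, new_carry, new_delta)
--             if res is not None:
--                 return [a_i] + res
--
--         return None
--
--     a_digits = dfs(0, 0, 0)
--     if a_digits is None:
--         return None
--     a = 0
--     for i, digit in enumerate(a_digits):
--         a += digit * (10 ** i)
--     b = a + d
--     return a, b
-- ===== SOURCE B (Python) =====
-- def find_pair_digit_dp(d):
--     if d == 0:
--         return 0, 0
--
--     if d % 9 != 0: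
--         return None
--     digits = list(map(int, str(d)[::-1])) + [0]
--     max_delta = 9 * len(digits)
--
--     def step(d_i, nxt):
--         # states (carry, delta) at this position from which the terminal
--         # state (carry 0, delta 0 past the last digit) is reachable
--         return [(c, delta)
--                 for c in (0, 1)
--                 for delta in range(-max_delta, max_delta + 1)
--                 if any(((a + d_i + c) // 10, delta + a - (a + d_i + c) % 10) in nxt
--                        for a in range(10))]
--
--     def tables(ds):
--         # reachable-state table for every suffix of ds, last entry = past the end
--         if not ds:
--             return [[(0, 0)]]
--         rest = tables(ds[1:])
--         return [step(ds[0], rest[0])] + rest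
--
--     ts = tables(digits)
--     if (0, 0) not in ts[0]:
--         return None
--     a_digits = []
--     carry, delta = 0, 0
--     for d_i, nxt in zip(digits, ts[1:]):
--         a_i = next(a for a in range(10)
--                    if ((a + d_i + carry) // 10, delta + a - (a + d_i + carry) % 10) in nxt)
--         a_digits.append(a_i)
--         carry, delta = (a_i + d_i + carry) // 10, delta + a_i - (a_i + d_i + carry) % 10
--     a = 0
--     for dig in reversed(a_digits):
--         a = a * 10 + dig
--     return a, a + d
-- ===== Notes on version B (the rewrite author's own statement) =====
-- stated objective: alternative
-- what changed: A's memoized recursive backtracking dfs that builds the digit list is replaced by an explicit backward-reachability table over states (carry, delta) for every suffix of the digit list, followed by a single greedy forward pass that picks the smallest feasible digit at each position.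
import Mathlib
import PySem

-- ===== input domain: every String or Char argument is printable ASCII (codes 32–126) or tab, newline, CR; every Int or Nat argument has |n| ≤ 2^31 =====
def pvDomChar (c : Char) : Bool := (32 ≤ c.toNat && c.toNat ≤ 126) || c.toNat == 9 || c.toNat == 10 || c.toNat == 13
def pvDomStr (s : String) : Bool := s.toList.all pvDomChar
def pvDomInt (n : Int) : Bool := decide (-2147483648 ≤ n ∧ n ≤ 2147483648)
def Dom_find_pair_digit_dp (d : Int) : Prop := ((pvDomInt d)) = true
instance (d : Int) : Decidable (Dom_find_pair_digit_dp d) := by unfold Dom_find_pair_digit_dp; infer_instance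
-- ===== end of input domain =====

-- B replaces A's memoized backtracking search by a backward-reachability table plus one
-- greedy forward reconstruction pass (alternative decomposition, same results).


-- ===== PORT A =====
-- A's inner 'for a_i in range(10)' loop (try candidate digits in order, first success wins)
-- and the recursive dfs, as a mutual recursion over the remaining digits.
mutual
def dfsA (maxd : Int) : List Int → Int → Int → Option (List Int)
  | [], carry, delta => if carry = 0 ∧ delta = 0 then some [] else none
  | di :: rest, carry, delta => tryA maxd di rest carry delta (PySem.List.pyRange 0 10 1)
termination_by l _ _ => (l.length, 1, 0)

def tryA (maxd di : Int) (rest : List Int) (carry delta : Int) : List Int → Option (List Int)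
  | [] => none
  | a :: more =>
    let s := a + di + carry
    let b := PySem.Int.mod s 10
    let nc := PySem.Int.floordiv s 10
    let nd := delta + (a - b)
    if |nd| > maxd then tryA maxd di rest carry delta more
    else
      match dfsA maxd rest nc nd with
      | some res => some (a :: res)
      | none => tryA maxd di rest carry delta more
termination_by cands => (rest.length + 1, 0, cands.length)
end

def find_pair_digit_dp (d : Int) : Option (Int × Int) :=
  if d = 0 then some (0, 0)
  else if PySem.Int.mod d 9 ≠ 0 then none
  else
    -- str(d)[::-1] is the reversed character list (PySem.Int.toChars, slice?_none_none_neg_one);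
    -- int(c) on the single characters of str(d): via PySem.Int.ofChars?; the .getD 0 is taken
    -- only where Python raises ValueError (d < 0), which Pre_ excludes.
    let digits := ((PySem.Int.toChars d).reverse.map
        (fun c => (PySem.Int.ofChars? [c]).getD 0)) ++ [0]
    let maxd : Int := 9 * (digits.length : Int)
    match dfsA maxd digits 0 0 with
    | none => none
    | some adigs =>
      -- a += digit * 10**i over enumerate(a_digits); i ≥ 0 so 10**i is 10 ^ i.toNat exactly
      let a := (PySem.List.enumerate adigs 0).foldl
          (fun acc p => acc + p.2 * 10 ^ p.1.toNat) 0
      some (a, a + d)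

-- ===== PORT B =====
-- states (carry, delta) at this position from which the terminal state is reachable across digit di
def stepB (maxd di : Int) (nxt : List (Int × Int)) : List (Int × Int) :=
  ([0, 1] : List Int).flatMap fun c =>
    ((PySem.List.pyRange (-maxd) (maxd + 1) 1).filter fun delta =>
      (PySem.List.pyRange 0 10 1).any fun a =>
        nxt.contains (PySem.Int.floordiv (a + di + c) 10,
                      delta + a - PySem.Int.mod (a + di + c) 10)).map fun delta => (c, delta)

-- reachable-state table for every suffix of the digit list, last entry = past the end
def tablesB (maxd : Int) : List Int → List (List (Int × Int))
  | [] => [[(0, 0)]]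
  | di :: rest =>
    let ts := tablesB maxd rest
    stepB maxd di (ts.headD []) :: ts

-- forward pass over zip(digits, ts[1:]): smallest digit whose successor state is reachable
def forwardB : List (Int × List (Int × Int)) → Int → Int → List Int
  | [], _, _ => []
  | (di, nxt) :: more, carry, delta =>
    match (PySem.List.pyRange 0 10 1).find? (fun a =>
        nxt.contains (PySem.Int.floordiv (a + di + carry) 10,
                      delta + a - PySem.Int.mod (a + di + carry) 10)) with
    | none => []   -- unreachable when the start state is in the table (Python's next(...) cannot raise)
    | some a => a :: forwardB more (PySem.Int.floordiv (a + di + carry) 10)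
                      (delta + a - PySem.Int.mod (a + di + carry) 10)

def find_pair_digit_dp_alt (d : Int) : Option (Int × Int) :=
  if d = 0 then some (0, 0)
  else if PySem.Int.mod d 9 ≠ 0 then none
  else
    -- same digits construction as A (shared source line); see the comment in Port A
    let digits := ((PySem.Int.toChars d).reverse.map
        (fun c => (PySem.Int.ofChars? [c]).getD 0)) ++ [0]
    let maxd : Int := 9 * (digits.length : Int)
    let ts := tablesB maxd digits
    if (0, 0) ∈ ts.headD [] then
      let adigs := forwardB (digits.zip ts.tail) 0 0
      let a := adigs.reverse.foldl (fun acc dig => acc * 10 + dig) 0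
      some (a, a + d)
    else none

-- ===== PRECONDITION & SPEC =====
-- Pre_ excludes negative multiples of 9 (d < 0 with d % 9 == 0): there both Pythons raise
-- ValueError in int() on the '-' sign of str(d)[::-1].
def Pre_find_pair_digit_dp (d : Int) : Prop := 0 ≤ d ∨ PySem.Int.mod d 9 ≠ 0
instance (d : Int) : Decidable (Pre_find_pair_digit_dp d) := by unfold Pre_find_pair_digit_dp; infer_instance
def pvWitness_find_pair_digit_dp : Int := 9

def Spec_find_pair_digit_dp (d : Int) (out : Option (Int × Int)) : Prop := out = find_pair_digit_dp_alt d
instance (d : Int) (out : Option (Int × Int)) : Decidable (Spec_find_pair_digit_dp d out) := by unfold Spec_find_pair_digit_dp; infer_instance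

-- ===== CLAIM (what is proved, stated in full; the proofs are below) =====
def Claim_equal_find_pair_digit_dp : Prop := ∀ (d : Int), Dom_find_pair_digit_dp d → Pre_find_pair_digit_dp d → Spec_find_pair_digit_dp d (find_pair_digit_dp d)

-- ===== LEMMAS AND PROOFS =====

-- the successor state of (carry, delta) after choosing digit a against digit di
def pvNC (a di c : Int) : Int := PySem.Int.floordiv (a + di + c) 10
def pvND (a di c delta : Int) : Int := delta + a - PySem.Int.mod (a + di + c) 10

lemma pvNC_mem (a di c : Int) (ha : 0 ≤ a ∧ a ≤ 9) (hdi : 0 ≤ di ∧ di ≤ 9)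
    (hc : c = 0 ∨ c = 1) : pvNC a di c = 0 ∨ pvNC a di c = 1 := by
  have h1 := PySem.Int.floordiv_mul_add_mod (a + di + c) 10
  have h2 := PySem.Int.mod_nonneg (a + di + c) (by norm_num : (0:Int) < 10)
  have h3 := PySem.Int.mod_lt (a + di + c) (by norm_num : (0:Int) < 10)
  unfold pvNC; omega

lemma mem_stepB {maxd di : Int} {nxt : List (Int × Int)} {c delta : Int} :
    (c, delta) ∈ stepB maxd di nxt ↔
      (c = 0 ∨ c = 1) ∧ (-maxd ≤ delta ∧ delta < maxd + 1) ∧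
      ∃ a, 0 ≤ a ∧ a < 10 ∧ (pvNC a di c, pvND a di c delta) ∈ nxt := by
  simp only [stepB, List.mem_flatMap, List.mem_map, List.mem_filter,
    PySem.List.mem_pyRange_one, List.any_eq_true, List.contains_iff_mem, pvNC, pvND,
    List.mem_cons, List.not_mem_nil, or_false]
  constructor
  · rintro ⟨c', hc', δ, ⟨⟨hδ1, hδ2⟩, a, ⟨ha1, ha2⟩, hmem⟩, h⟩
    obtain ⟨rfl, rfl⟩ := Prod.mk.injEq .. ▸ h
    exact ⟨hc', ⟨hδ1, hδ2⟩, a, ha1, ha2, hmem⟩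
  · rintro ⟨hc, ⟨hδ1, hδ2⟩, a, ha1, ha2, hmem⟩
    exact ⟨c, hc, delta, ⟨⟨hδ1, hδ2⟩, a, ⟨ha1, ha2⟩, hmem⟩, rfl⟩

lemma mem_table_shape {maxd : Int} (hm : 0 ≤ maxd) :
    ∀ (rest : List Int) (c delta : Int), (c, delta) ∈ (tablesB maxd rest).headD [] →
      (c = 0 ∨ c = 1) ∧ -maxd ≤ delta ∧ delta ≤ maxd := by
  intro rest c delta h
  cases rest with
  | nil =>
    simp only [tablesB, List.headD, List.mem_singleton, Prod.mk.injEq] at h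
    omega
  | cons di rs =>
    simp only [tablesB, List.headD] at h
    obtain ⟨hc, ⟨h1, h2⟩, -⟩ := mem_stepB.1 h
    omega

-- A's inner loop characterized through find?
lemma tryA_eq (maxd di : Int) (rest : List Int) (c delta : Int) : ∀ cands : List Int,
    tryA maxd di rest c delta cands =
      match cands.find? (fun a => decide (|pvND a di c delta| ≤ maxd) &&
          (dfsA maxd rest (pvNC a di c) (pvND a di c delta)).isSome) with
      | none => none
      | some a => (dfsA maxd rest (pvNC a di c) (pvND a di c delta)).map (a :: ·) := by
  intro cands
  induction cands with
  | nil => simp [tryA]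
  | cons a more ih =>
    rw [tryA, List.find?_cons]
    simp only [← add_sub_assoc]
    by_cases habs : |delta + a - PySem.Int.mod (a + di + c) 10| > maxd
    · have : ¬ |pvND a di c delta| ≤ maxd := by unfold pvND; omega
      simp only [habs, if_true, this, decide_false, Bool.false_and, ih]
    · have habs' : |pvND a di c delta| ≤ maxd := by unfold pvND; omega
      simp only [habs, if_false]
      cases hdf : dfsA maxd rest (pvNC a di c) (pvND a di c delta) with
      | some res =>
        have hdf' : dfsA maxd rest ((a + di + c) / 10)
            (delta + a - (a + di + c) % 10) = some res := by simpa [pvNC, pvND] using hdf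
        simp [habs', hdf, hdf']
      | none =>
        have hdf' : dfsA maxd rest ((a + di + c) / 10)
            (delta + a - (a + di + c) % 10) = none := by simpa [pvNC, pvND] using hdf
        simp [habs', hdf', ih]

-- reachability table ↔ dfs success
lemma reach_iff {maxd : Int} (hm : 0 ≤ maxd) :
    ∀ (rest : List Int), (∀ x ∈ rest, 0 ≤ x ∧ x ≤ 9) →
    ∀ (c delta : Int), (c = 0 ∨ c = 1) → -maxd ≤ delta → delta ≤ maxd →
      ((c, delta) ∈ (tablesB maxd rest).headD [] ↔ (dfsA maxd rest c delta).isSome) := by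
  intro rest
  induction rest with
  | nil =>
    intro _ c delta hc h1 h2
    simp only [tablesB, List.headD, List.mem_singleton, Prod.mk.injEq, dfsA]
    split_ifs with h
    · simp only [Option.isSome_some, iff_true]; exact ⟨h.1, h.2⟩
    · simp only [Option.isSome_none, Bool.false_eq_true, iff_false]; tauto
  | cons di rs ih =>
    intro hdig c delta hc h1 h2
    have hdi : 0 ≤ di ∧ di ≤ 9 := hdig di (by simp)
    have hdig' : ∀ x ∈ rs, 0 ≤ x ∧ x ≤ 9 := fun x hx => hdig x (by simp [hx])
    rw [dfsA, tryA_eq]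
    simp only [tablesB, List.headD_cons]
    rw [mem_stepB]
    cases hfind : (PySem.List.pyRange 0 10 1).find? (fun a =>
        decide (|pvND a di c delta| ≤ maxd) &&
        (dfsA maxd rs (pvNC a di c) (pvND a di c delta)).isSome) with
    | some a =>
      have hpred := List.find?_some hfind
      have hamem := List.mem_of_find?_eq_some hfind
      simp only [PySem.List.mem_pyRange_one] at hamem
      simp only [Bool.and_eq_true, decide_eq_true_eq] at hpred
      obtain ⟨hnd, hsome⟩ := hpred
      have hnd' := abs_le.1 hnd
      cases hdf : dfsA maxd rs (pvNC a di c) (pvND a di c delta) with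
      | none => rw [hdf] at hsome; simp at hsome
      | some res =>
        simp only [hdf, Option.map_some, Option.isSome_some, iff_true]
        refine ⟨hc, ⟨h1, by omega⟩, a, hamem.1, hamem.2, ?_⟩
        have hnc := pvNC_mem a di c ⟨hamem.1, by omega⟩ hdi hc
        exact (ih hdig' (pvNC a di c) (pvND a di c delta) hnc (by omega) (by omega)).2
          (by rw [hdf]; rfl)
    | none =>
      simp only [Option.isSome_none, Bool.false_eq_true, iff_false]
      rintro ⟨-, -, a, ha1, ha2, hmem⟩
      have hsh := mem_table_shape hm rs _ _ hmem
      have hnc := pvNC_mem a di c ⟨ha1, by omega⟩ hdi hc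
      have hsome := (ih hdig' (pvNC a di c) (pvND a di c delta) hnc
        (by omega) (by omega)).1 hmem
      have := List.find?_eq_none.1 hfind a (by simp [PySem.List.mem_pyRange_one]; omega)
      simp only [Bool.and_eq_true, decide_eq_true_eq, not_and] at this
      exact absurd hsome (by simpa using this (abs_le.2 ⟨by omega, by omega⟩))

lemma tablesB_cons_shape (maxd : Int) (rs : List Int) :
    tablesB maxd rs = ((tablesB maxd rs).headD []) :: (tablesB maxd rs).tail := by
  cases rs <;> simp [tablesB]

lemma find?_congr_mem {α : Type} (l : List α) (p q : α → Bool)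
    (h : ∀ x ∈ l, p x = q x) : l.find? p = l.find? q := by
  induction l with
  | nil => rfl
  | cons a t ih =>
    rw [List.find?_cons, List.find?_cons, h a (List.mem_cons_self ..)]
    cases q a
    · exact ih fun x hx => h x (List.mem_cons_of_mem _ hx)
    · rfl

-- the forward pass reconstructs exactly dfs's digit list
lemma forward_eq {maxd : Int} (hm : 0 ≤ maxd) :
    ∀ (rest : List Int), (∀ x ∈ rest, 0 ≤ x ∧ x ≤ 9) →
    ∀ (c delta : Int) (l : List Int), (c = 0 ∨ c = 1) → -maxd ≤ delta → delta ≤ maxd →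
      dfsA maxd rest c delta = some l →
      forwardB (rest.zip (tablesB maxd rest).tail) c delta = l := by
  intro rest
  induction rest with
  | nil =>
    intro _ c delta l _ _ _ h
    rw [dfsA] at h
    by_cases hcd : c = 0 ∧ delta = 0
    · rw [if_pos hcd] at h
      cases h
      rfl
    · rw [if_neg hcd] at h
      cases h
  | cons di rs ih =>
    intro hdig c delta l hc h1 h2 h
    have hdi : 0 ≤ di ∧ di ≤ 9 := hdig di (by simp)
    have hdig' : ∀ x ∈ rs, 0 ≤ x ∧ x ≤ 9 := fun x hx => hdig x (by simp [hx])
    rw [dfsA, tryA_eq] at h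
    cases hfind : (PySem.List.pyRange 0 10 1).find? (fun a =>
        decide (|pvND a di c delta| ≤ maxd) &&
        (dfsA maxd rs (pvNC a di c) (pvND a di c delta)).isSome) with
    | none => rw [hfind] at h; cases h
    | some a =>
      rw [hfind] at h
      replace h : (dfsA maxd rs (pvNC a di c) (pvND a di c delta)).map (a :: ·) = some l := h
      have hpred := List.find?_some hfind
      have hamem := List.mem_of_find?_eq_some hfind
      simp only [PySem.List.mem_pyRange_one] at hamem
      simp only [Bool.and_eq_true, decide_eq_true_eq] at hpred
      obtain ⟨hnd, hsome⟩ := hpred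
      have hnd' := abs_le.1 hnd
      have hnc := pvNC_mem a di c ⟨hamem.1, by omega⟩ hdi hc
      cases hdf : dfsA maxd rs (pvNC a di c) (pvND a di c delta) with
      | none => rw [hdf] at hsome; simp at hsome
      | some res =>
        rw [hdf] at h
        simp only [Option.map_some, Option.some.injEq] at h
        subst h
        -- unfold one step of B's forward pass
        simp only [tablesB, List.tail_cons]
        rw [tablesB_cons_shape maxd rs, List.zip_cons_cons, forwardB]
        have hpq : ∀ x ∈ PySem.List.pyRange 0 10 1,
            (((tablesB maxd rs).headD []).contains (PySem.Int.floordiv (x + di + c) 10,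
              delta + x - PySem.Int.mod (x + di + c) 10))
            = (decide (|pvND x di c delta| ≤ maxd) &&
               (dfsA maxd rs (pvNC x di c) (pvND x di c delta)).isSome) := by
          intro x hx
          simp only [PySem.List.mem_pyRange_one] at hx
          have hncx := pvNC_mem x di c ⟨hx.1, by omega⟩ hdi hc
          show ((tablesB maxd rs).headD []).contains (pvNC x di c, pvND x di c delta) = _
          rw [List.contains_eq_mem]
          by_cases hmem : (pvNC x di c, pvND x di c delta) ∈ (tablesB maxd rs).headD []
          · have hsh := mem_table_shape hm rs _ _ hmem
            have hx1 := (reach_iff hm rs hdig' _ _ hncx (by omega) (by omega)).1 hmem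
            rw [decide_eq_true hmem, decide_eq_true (abs_le.2 ⟨hsh.2.1, hsh.2.2⟩), hx1]
            rfl
          · rw [decide_eq_false hmem]
            by_cases hb : |pvND x di c delta| ≤ maxd
            · have hb' := abs_le.1 hb
              have hno : (dfsA maxd rs (pvNC x di c) (pvND x di c delta)).isSome = false := by
                cases hiso : (dfsA maxd rs (pvNC x di c) (pvND x di c delta)).isSome
                · rfl
                · exact absurd ((reach_iff hm rs hdig' _ _ hncx (by omega) (by omega)).2 hiso) hmem
              rw [hno, Bool.and_false]
            · rw [decide_eq_false hb, Bool.false_and]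
        rw [find?_congr_mem _ _ _ hpq, hfind]
        show a :: forwardB (rs.zip (tablesB maxd rs).tail) (pvNC a di c) (pvND a di c delta)
            = a :: res
        exact congrArg (List.cons a)
          (ih hdig' (pvNC a di c) (pvND a di c delta) res hnc (by omega) (by omega) hdf)

-- little-endian value of a digit list
def pvVal : List Int → Int
  | [] => 0
  | x :: xs => x + 10 * pvVal xs

lemma reconA_eq (l : List Int) : ∀ (s : Nat) (acc : Int),
    (PySem.List.enumerate l (s : Int)).foldl (fun acc p => acc + p.2 * 10 ^ p.1.toNat) acc
      = acc + 10 ^ s * pvVal l := by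
  induction l with
  | nil => intro s acc; simp [PySem.List.enumerate, pvVal]
  | cons x xs ih =>
    intro s acc
    rw [PySem.List.enumerate_cons, List.foldl_cons]
    have hcast : (s : Int) + 1 = ((s + 1 : Nat) : Int) := by push_cast; ring
    rw [hcast, ih (s + 1)]
    simp only [Int.toNat_natCast, pvVal, pow_succ]
    ring

lemma reconB_eq (l : List Int) : ∀ acc : Int,
    l.reverse.foldl (fun acc dig => acc * 10 + dig) acc = acc * 10 ^ l.length + pvVal l := by
  induction l with
  | nil => intro acc; simp [pvVal]
  | cons x xs ih =>
    intro acc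
    rw [List.reverse_cons, List.foldl_append, ih]
    simp only [List.foldl_cons, List.foldl_nil, pvVal, List.length_cons, pow_succ]
    ring

lemma digitChar_mem (k : Nat) (hk : k < 10) :
    Nat.digitChar k ∈ ['0','1','2','3','4','5','6','7','8','9'] := by
  interval_cases k <;> decide

lemma toDigitsCore_mem : ∀ (f n : Nat) (acc : List Char),
    ∀ c ∈ Nat.toDigitsCore 10 f n acc, c ∈ acc ∨ c ∈ ['0','1','2','3','4','5','6','7','8','9'] := by
  intro f
  induction f with
  | zero => intro n acc c hc; exact Or.inl hc
  | succ f ih =>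
    intro n acc c hc
    have hch := digitChar_mem (n % 10) (Nat.mod_lt _ (by norm_num))
    simp only [Nat.toDigitsCore] at hc
    by_cases hz : n / 10 = 0
    · rw [if_pos hz] at hc
      rcases List.mem_cons.1 hc with h | h
      · exact Or.inr (h ▸ hch)
      · exact Or.inl h
    · rw [if_neg hz] at hc
      rcases ih (n / 10) ((n % 10).digitChar :: acc) c hc with h | h
      · rcases List.mem_cons.1 h with h' | h'
        · exact Or.inr (h' ▸ hch)
        · exact Or.inl h'
      · exact Or.inr h

lemma digits_ok (d : Int) (hd : 0 < d) :
    ∀ x ∈ ((PySem.Int.toChars d).reverse.map (fun c => (PySem.Int.ofChars? [c]).getD 0)) ++ [(0:Int)],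
      0 ≤ x ∧ x ≤ 9 := by
  intro x hx
  rcases List.mem_append.1 hx with h | h
  · obtain ⟨c, hc, rfl⟩ := List.mem_map.1 h
    rw [List.mem_reverse] at hc
    have hch : c ∈ ['0','1','2','3','4','5','6','7','8','9'] := by
      have : PySem.Int.toChars d = Nat.toDigits 10 d.toNat := by
        rw [PySem.Int.toChars, if_neg (by omega)]
      rw [this, Nat.toDigits] at hc
      rcases toDigitsCore_mem _ _ _ c hc with h' | h'
      · exact absurd h' (List.not_mem_nil)
      · exact h'
    fin_cases hch <;> decide
  · rw [List.mem_singleton] at h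
    omega

-- ===== VERDICT (by name: the statement is the Claim_ definition above) =====
theorem find_pair_digit_dp_spec : Claim_equal_find_pair_digit_dp := by
  intro d _ hpre
  unfold Spec_find_pair_digit_dp find_pair_digit_dp find_pair_digit_dp_alt
  by_cases h0 : d = 0
  · rw [if_pos h0, if_pos h0]
  · rw [if_neg h0, if_neg h0]
    by_cases h9 : PySem.Int.mod d 9 ≠ 0
    · rw [if_pos h9, if_pos h9]
    · rw [if_neg h9, if_neg h9]
      have hmod : PySem.Int.mod d 9 = 0 := by omega
      have hd : 0 < d := by
        rcases hpre with h | h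
        · omega
        · exact absurd hmod h
      simp only []
      set digits := ((PySem.Int.toChars d).reverse.map
        (fun c => (PySem.Int.ofChars? [c]).getD 0)) ++ [(0:Int)] with hdigits
      set maxd : Int := 9 * (digits.length : Int) with hmaxd
      have hdig : ∀ x ∈ digits, 0 ≤ x ∧ x ≤ 9 := digits_ok d hd
      have hm : (0:Int) ≤ maxd := by positivity
      cases hdfs : dfsA maxd digits 0 0 with
      | none =>
        have hnm : ¬ ((0, 0) ∈ (tablesB maxd digits).headD []) := by
          rw [reach_iff hm digits hdig 0 0 (Or.inl rfl) (by omega) (by omega), hdfs]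
          simp
        rw [if_neg hnm]
      | some adigs =>
        have hmem : ((0:Int), (0:Int)) ∈ (tablesB maxd digits).headD [] := by
          rw [reach_iff hm digits hdig 0 0 (Or.inl rfl) (by omega) (by omega), hdfs]
          rfl
        rw [if_pos hmem]
        simp only []
        rw [forward_eq hm digits hdig 0 0 adigs (Or.inl rfl) (by omega) (by omega) hdfs]
        have hA : (PySem.List.enumerate adigs 0).foldl
            (fun acc p => acc + p.2 * 10 ^ p.1.toNat) 0 = pvVal adigs := by
          have := reconA_eq adigs 0 0
          simpa using this
        have hB : adigs.reverse.foldl (fun acc dig => acc * 10 + dig) 0 = pvVal adigs := by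
          have := reconB_eq adigs 0
          simpa using this
        rw [hA, hB]
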